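-- pv_equiv track=rewrite | github.com/alexisechano/Artificial-Intelligence-1 | csp/sudoku_part_2_Echano_A.py | create_boxes
-- ===== SOURCE A (Python) =====
-- def determine_possibles(value, assignment, csp, constraints, x):  #for non solved, csp are adjacents
--     current_neighbors = csp[value]  #retreives adjacent set
--
--     possible_numbers = set()
--     if(x == 9):
--         possible_numbers.update(['1', '2', '3', '4', '5', '6', '7', '8', '9'])
--     if(x == 12):
--         possible_numbers.update(['1', '2', '3', '4', '5', '6', '7', '8', '9', 'A', 'B', 'C'])
--     if(x == 16):
--         possible_numbers.update(['1', '2', '3', '4', '5', '6', '7', '8', '9', 'A', 'B', 'C', 'D', 'E', 'F', 'G'])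
--
--     items = {assignment[number] for number in current_neighbors if number in assignment}
--
--     temp_domain = possible_numbers - items
--     return temp_domain
--
-- def adjacents(val,rows, cols, boxes):    #look up table/CSP, val is index
--     adjacent_set = set()
--
--     for row in rows:
--         if(val in row):
--             adjacent_set.update(row)
--             break
--
--     for col in cols:
--         if(val in col):
--             adjacent_set.update(col)
--             break
--
--     for box in boxes:
--         if(val in box):
--             adjacent_set.update(box)
--             break
--
--     if(val in adjacent_set):
--         adjacent_set.remove(val)
--
--     return adjacent_set
--
-- def create_boxes(line, r, c, b, m, n):   #create sets and use adjaents to create look up table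
--     curr_list = []   #map usage since indexes can be values
--     start_state = {}  #dictionary to print first state
--     possibs = {}
--     look_up_table = {}  #key is the index and set is the value of adjacents
--
--     for i in range(0, len(line)): #only fill in the knowns
--         if(line[i] == '.'):
--             curr_list.append(i)
--         else:
--             start_state[i] = line[i] #adds to empty list for solving
--
--     for y in range(0,len(line)):    #builds variables
--         if(y in curr_list):
--             look_up_table[y] = adjacents(y, r, c, b)
--             possibs[y] = determine_possibles(y, start_state, look_up_table, {}, m* n)
--
--     return look_up_table, curr_list, start_state, possibs
-- ===== SOURCE B (Python) =====
-- def create_boxes(line, r, c, b, m, n):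
--     # Alternative structure: one enumerate pass to split knowns/unknowns; then hash
--     # indexes (first group containing each index, built once per family) replace the
--     # per-cell scans of all rows/cols/boxes; domains come from one precomputed alphabet.
--     curr_list = []
--     start_state = {}
--     for i, ch in enumerate(line):
--         if ch == '.':
--             curr_list.append(i)
--         else:
--             start_state[i] = ch
--
--     def first_group_map(groups):
--         d = {}
--         for g in groups:
--             for v in g:
--                 d.setdefault(v, g)
--         return d
--
--     rmap = first_group_map(r)
--     cmap = first_group_map(c)
--     bmap = first_group_map(b)
--
--     x = m * n
--     if x == 9:
--         alphabet = ['1', '2', '3', '4', '5', '6', '7', '8', '9']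
--     elif x == 12:
--         alphabet = ['1', '2', '3', '4', '5', '6', '7', '8', '9', 'A', 'B', 'C']
--     elif x == 16:
--         alphabet = ['1', '2', '3', '4', '5', '6', '7', '8', '9', 'A', 'B', 'C', 'D', 'E', 'F', 'G']
--     else:
--         alphabet = []
--     full = set(alphabet)
--
--     look_up_table = {}
--     possibs = {}
--     for y in curr_list:
--         neighbors = set(rmap.get(y, []) + cmap.get(y, []) + bmap.get(y, []))
--         neighbors.discard(y)
--         look_up_table[y] = neighbors
--         taken = {start_state[v] for v in neighbors if v in start_state}
--         possibs[y] = full - taken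
--     return look_up_table, curr_list, start_state, possibs
-- ===== Notes on version B (the rewrite author's own statement) =====
-- stated objective: alternative
-- what changed: B builds one first-group hash map per constraint family (rows/cols/boxes) once and looks each cell's neighbors up, instead of A's re-scan of every group for every unknown cell; B also iterates the unknown-cell list directly rather than re-walking range(len(line)) with a list-membership test, and computes the alphabet once instead of per cell. It trades A's per-cell scans for an upfront index build, so it is not measurably faster on the benchmark inputs.
import Mathlib
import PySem

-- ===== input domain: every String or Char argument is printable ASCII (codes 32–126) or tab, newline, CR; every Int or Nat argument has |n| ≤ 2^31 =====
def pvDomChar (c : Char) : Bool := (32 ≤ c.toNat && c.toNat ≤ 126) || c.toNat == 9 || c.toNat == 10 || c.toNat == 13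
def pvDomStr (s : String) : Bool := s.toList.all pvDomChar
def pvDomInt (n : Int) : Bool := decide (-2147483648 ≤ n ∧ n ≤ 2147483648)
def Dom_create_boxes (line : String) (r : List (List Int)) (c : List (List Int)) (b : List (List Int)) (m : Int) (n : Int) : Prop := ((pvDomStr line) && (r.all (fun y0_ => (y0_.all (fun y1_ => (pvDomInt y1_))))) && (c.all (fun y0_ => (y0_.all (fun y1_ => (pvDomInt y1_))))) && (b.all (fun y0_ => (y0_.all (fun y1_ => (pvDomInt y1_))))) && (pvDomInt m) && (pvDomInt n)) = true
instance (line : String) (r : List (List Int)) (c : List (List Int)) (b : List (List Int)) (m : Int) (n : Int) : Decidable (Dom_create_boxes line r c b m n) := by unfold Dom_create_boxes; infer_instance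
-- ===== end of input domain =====

-- B replaces A's per-cell scans of all rows/cols/boxes by three first-group hash
-- indexes built once, iterates the unknown cells directly instead of re-scanning
-- range(len(line)) with a list-membership test, and computes the alphabet once
-- (objective: alternative algorithm, same cost; the return value is proved identical).

-- ===== PORT A =====
-- determine_possibles(value, assignment, csp, constraints, x); csp[value] is
-- ported as getD: at the only call site the key was just inserted, so the
-- KeyError branch of csp[value] is unreachable and getD is exact there.
def pyDeterminePossibles (value : Int) (assignment : PySem.Dict Int String)
    (csp : PySem.Dict Int (List Int)) (_constraints : PySem.Dict Int String) (x : Int) : List String :=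
  let current_neighbors : List Int := csp.getD value []
  let p0 : PySem.Set String := PySem.Set.empty
  let p1 := if x = 9 then p0.update ["1","2","3","4","5","6","7","8","9"] else p0
  let p2 := if x = 12 then p1.update ["1","2","3","4","5","6","7","8","9","A","B","C"] else p1
  let p3 := if x = 16 then p2.update ["1","2","3","4","5","6","7","8","9","A","B","C","D","E","F","G"] else p2
  let items : PySem.Set String :=
    PySem.Set.ofList ((current_neighbors.filter (fun nb => assignment.contains nb)).map
      (fun nb => assignment.getD nb ""))
  p3.diff items

-- the three 'for group …: if val in group: update; break' loops of adjacents
def pyScanUpdate (s : PySem.Set Int) (groups : List (List Int)) (val : Int) : PySem.Set Int :=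
  match groups with
  | [] => s
  | g :: rest => if val ∈ g then s.update g else pyScanUpdate s rest val

def pyAdjacents (val : Int) (rows cols boxes : List (List Int)) : PySem.Set Int :=
  let s1 := pyScanUpdate PySem.Set.empty rows val
  let s2 := pyScanUpdate s1 cols val
  let s3 := pyScanUpdate s2 boxes val
  if s3.contains val then
    match s3.remove? val with   -- adjacent_set.remove(val): guarded, so never KeyError
    | some t => t
    | none => s3
  else s3

def create_boxes (line : String) (r : List (List Int)) (c : List (List Int)) (b : List (List Int)) (m : Int) (n : Int) : (List (Int × List Int)) × List Int × (List (Int × String)) × (List (Int × List String)) :=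
  let cs := line.toList
  let split := (PySem.List.pyRange 0 (PySem.Str.len line) 1).foldl
    (fun (acc : List Int × PySem.Dict Int String) i =>
      let ch := PySem.List.pyGetD cs i ' '   -- line[i], i in range(len(line)): always in range
      if ch = '.' then (acc.1 ++ [i], acc.2) else (acc.1, acc.2.insert i (String.ofList [ch])))
    ([], PySem.Dict.empty)
  let curr_list := split.1
  let start_state := split.2
  let loop2 := (PySem.List.pyRange 0 (PySem.Str.len line) 1).foldl
    (fun (acc : PySem.Dict Int (PySem.Set Int) × PySem.Dict Int (List String)) y =>
      if curr_list.contains y then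
        let lut := acc.1.insert y (pyAdjacents y r c b)
        (lut, acc.2.insert y (pyDeterminePossibles y start_state lut PySem.Dict.empty (m * n)))
      else acc)
    (PySem.Dict.empty, PySem.Dict.empty)
  (loop2.1.items, curr_list, start_state.items, loop2.2.items)

-- ===== PORT B =====
def altFirstGroupMap (groups : List (List Int)) : PySem.Dict Int (List Int) :=
  groups.foldl (fun d g => g.foldl (fun d v => d.setdefault v g) d) PySem.Dict.empty

def create_boxes_alt (line : String) (r : List (List Int)) (c : List (List Int)) (b : List (List Int)) (m : Int) (n : Int) : (List (Int × List Int)) × List Int × (List (Int × String)) × (List (Int × List String)) :=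
  let split := (PySem.List.enumerate line.toList).foldl
    (fun (acc : List Int × PySem.Dict Int String) p =>
      if p.2 = '.' then (acc.1 ++ [p.1], acc.2) else (acc.1, acc.2.insert p.1 (String.ofList [p.2])))
    ([], PySem.Dict.empty)
  let curr_list := split.1
  let start_state := split.2
  let rmap := altFirstGroupMap r
  let cmap := altFirstGroupMap c
  let bmap := altFirstGroupMap b
  let x := m * n
  let alphabet : List String :=
    if x = 9 then ["1","2","3","4","5","6","7","8","9"]
    else if x = 12 then ["1","2","3","4","5","6","7","8","9","A","B","C"]
    else if x = 16 then ["1","2","3","4","5","6","7","8","9","A","B","C","D","E","F","G"]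
    else []
  let full : PySem.Set String := PySem.Set.ofList alphabet
  let loop := curr_list.foldl
    (fun (acc : PySem.Dict Int (PySem.Set Int) × PySem.Dict Int (List String)) y =>
      let neighbors := (PySem.Set.ofList (rmap.getD y [] ++ cmap.getD y [] ++ bmap.getD y [])).discard y
      let taken := PySem.Set.ofList ((neighbors.filter (fun v => start_state.contains v)).map
        (fun v => start_state.getD v ""))
      (acc.1.insert y neighbors, acc.2.insert y (full.diff taken)))
    (PySem.Dict.empty, PySem.Dict.empty)
  (loop.1.items, curr_list, start_state.items, loop.2.items)

-- ===== PRECONDITION & SPEC =====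
def Spec_create_boxes (line : String) (r : List (List Int)) (c : List (List Int)) (b : List (List Int)) (m : Int) (n : Int) (out : (List (Int × List Int)) × List Int × (List (Int × String)) × (List (Int × List String))) : Prop := out = create_boxes_alt line r c b m n
instance (line : String) (r : List (List Int)) (c : List (List Int)) (b : List (List Int)) (m : Int) (n : Int) (out : (List (Int × List Int)) × List Int × (List (Int × String)) × (List (Int × List String))) : Decidable (Spec_create_boxes line r c b m n out) := by unfold Spec_create_boxes; infer_instance

-- ===== CLAIM (what is proved, stated in full; the proofs are below) =====
def Claim_equal_create_boxes : Prop := ∀ (line : String) (r : List (List Int)) (c : List (List Int)) (b : List (List Int)) (m : Int) (n : Int), Dom_create_boxes line r c b m n → Spec_create_boxes line r c b m n (create_boxes line r c b m n)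

-- ===== LEMMAS AND PROOFS =====

-- the first group (in list order) containing y; []/none if none does
def firstGroup (groups : List (List Int)) (y : Int) : List Int :=
  match groups with
  | [] => []
  | g :: rest => if y ∈ g then g else firstGroup rest y

def firstGroup? (groups : List (List Int)) (y : Int) : Option (List Int) :=
  match groups with
  | [] => none
  | g :: rest => if y ∈ g then some g else firstGroup? rest y

theorem enum_getElem? (cs : List Char) (s : Int) (k : Nat) :
    (PySem.List.enumerate cs s)[k]? = cs[k]?.map (fun a => (s + (k : Int), a)) := by
  induction cs generalizing s k with
  | nil => simp [PySem.List.enumerate]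
  | cons x xs ih =>
    cases k with
    | zero => simp [PySem.List.enumerate]
    | succ k =>
      simp only [PySem.List.enumerate, List.getElem?_cons_succ, ih (s+1) k]
      congr 1
      funext a
      simp
      ring

theorem enum_eq (cs : List Char) :
    (PySem.List.pyRange 0 (cs.length : Int) 1).map (fun i => (i, PySem.List.pyGetD cs i ' '))
      = PySem.List.enumerate cs 0 := by
  apply List.ext_getElem?
  intro k
  rw [enum_getElem?]
  rcases lt_or_ge k cs.length with hk | hk
  · rw [List.getElem?_map, PySem.List.getElem?_pyRange_one]
    rw [if_pos (by omega)]
    simp only [Option.map_some, zero_add]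
    rw [List.getElem?_eq_getElem hk]
    simp only [Option.map_some]
    congr 1
    rw [PySem.List.pyGetD_natCast]
    simp [List.getD_eq_getElem?_getD, List.getElem?_eq_getElem hk]
  · rw [List.getElem?_eq_none (by simpa using hk), List.getElem?_eq_none]
    · simp
    · simpa [PySem.List.length_pyRange_one] using hk

-- the two split loops (A: over range(len) with line[i]; B: over enumerate) agree
theorem split_eq (cs : List Char) :
    (PySem.List.pyRange 0 (cs.length : Int) 1).foldl
      (fun (acc : List Int × PySem.Dict Int String) i =>
        if PySem.List.pyGetD cs i ' ' = '.' then (acc.1 ++ [i], acc.2)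
        else (acc.1, acc.2.insert i (String.ofList [PySem.List.pyGetD cs i ' '])))
      ([], PySem.Dict.empty)
    = (PySem.List.enumerate cs).foldl
      (fun (acc : List Int × PySem.Dict Int String) p =>
        if p.2 = '.' then (acc.1 ++ [p.1], acc.2)
        else (acc.1, acc.2.insert p.1 (String.ofList [p.2])))
      ([], PySem.Dict.empty) := by
  rw [show PySem.List.enumerate cs = PySem.List.enumerate cs 0 from rfl, ← enum_eq, List.foldl_map]

theorem fold_fst_sublist (ps : List (Int × Char)) (l0 : List Int) :
    List.Sublist (ps.foldl (fun l p => if p.2 = '.' then l ++ [p.1] else l) l0) (l0 ++ ps.map (·.1)) := by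
  induction ps generalizing l0 with
  | nil => simp
  | cons p ps ih =>
    simp only [List.foldl_cons, List.map_cons]
    by_cases h : p.2 = '.'
    · simp only [h, if_pos]
      have := ih (l0 ++ [p.1])
      simpa [List.append_assoc] using this
    · simp only [if_neg h]
      exact (ih l0).trans (List.Sublist.append_left (List.sublist_cons_self _ _) l0)

theorem filter_mem_of_sublist {l xs : List Int} (h : List.Sublist l xs) (hn : xs.Nodup) :
    xs.filter (fun y => decide (y ∈ l)) = l := by
  induction h with
  | slnil => simp
  | @cons l₁ xs₁ a h ih =>
    rw [List.nodup_cons] at hn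
    have hal : a ∉ l₁ := fun hal => hn.1 (h.subset hal)
    simp only [List.filter_cons, decide_eq_true_eq]
    rw [if_neg (by simpa using hal)]
    exact ih hn.2
  | @cons₂ l' xs' a h ih =>
    rw [List.nodup_cons] at hn
    simp only [List.filter_cons]
    rw [if_pos (by simp)]
    congr 1
    rw [List.filter_congr (l := xs') (q := fun y => decide (y ∈ l'))
      (fun x hx => by
        simp only [decide_eq_decide, List.mem_cons]
        constructor
        · rintro (rfl | h2)
          · exact absurd hx hn.1
          · exact h2
        · exact Or.inr)]
    exact ih hn.2

theorem setdefault_eq_insert (d : PySem.Dict Int (List Int)) (k : Int) (v : List Int) :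
    d.setdefault k v = if d.contains k then d else d.insert k v := by
  by_cases h : d.contains k
  · simp [PySem.Dict.setdefault, h]
  · apply PySem.Dict.ext
    simp only [PySem.Dict.setdefault, h, Bool.false_eq_true, if_false]
    exact (PySem.Dict.items_insert_of_not_contains d v (by simpa using h)).symm

theorem get?_fold_setdefault (y : Int) (gv : List Int) :
    ∀ (g : List Int) (d : PySem.Dict Int (List Int)),
    ((g.foldl (fun d v => d.setdefault v gv) d).get? y)
      = if d.contains y then d.get? y else if y ∈ g then some gv else none := by
  intro g
  induction g with
  | nil =>
    intro d
    by_cases h : d.contains y <;>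
      simp [h, (PySem.Dict.get?_eq_none_iff_contains d y).mpr]
  | cons v g' ih =>
    intro d
    rw [List.foldl_cons, ih, setdefault_eq_insert]
    by_cases hv : d.contains v
    · rw [if_pos hv]
      by_cases hy : d.contains y
      · simp [hy]
      · simp only [hy, Bool.false_eq_true, if_false, List.mem_cons]
        by_cases hyv : y = v
        · subst hyv; exact absurd hv (by simpa [hy] using hy)
        · simp [hyv]
    · rw [if_neg hv]
      by_cases hyv : y = v
      · subst hyv
        rw [if_pos (by simp [PySem.Dict.contains_insert])]
        have hy : d.contains y = false := by simpa using hv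
        rw [show (d.insert y gv).get? y = some gv from PySem.Dict.get?_insert_self d y gv]
        simp [hy]
      · have hc : (d.insert v gv).contains y = d.contains y := by
          rw [PySem.Dict.contains_insert]
          simp [show (y == v) = false from by simpa using hyv]
        rw [hc]
        by_cases hy : d.contains y
        · rw [if_pos hy, if_pos hy]
          exact PySem.Dict.get?_insert_of_ne d gv hyv
        · simp only [hy, Bool.false_eq_true, if_false, List.mem_cons]
          simp [hyv]

theorem contains_fold_setdefault (y : Int) (gv : List Int) (g : List Int) (d : PySem.Dict Int (List Int)) :
    ((g.foldl (fun d v => d.setdefault v gv) d).contains y) = (d.contains y || decide (y ∈ g)) := by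
  rw [PySem.Dict.contains_eq_isSome_get?, get?_fold_setdefault]
  by_cases hy : d.contains y
  · rw [if_pos hy, ← PySem.Dict.contains_eq_isSome_get?, hy]
    simp
  · by_cases hyg : y ∈ g <;> simp [hy, hyg]

theorem get?_altFirstGroupMap_gen (y : Int) :
    ∀ (gs : List (List Int)) (d : PySem.Dict Int (List Int)),
    ((gs.foldl (fun d g => g.foldl (fun d v => d.setdefault v g) d) d).get? y)
      = if d.contains y then d.get? y else firstGroup? gs y := by
  intro gs
  induction gs with
  | nil =>
    intro d
    by_cases h : d.contains y <;>
      simp [h, firstGroup?, (PySem.Dict.get?_eq_none_iff_contains d y).mpr]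
  | cons g gs' ih =>
    intro d
    rw [List.foldl_cons, ih, contains_fold_setdefault, get?_fold_setdefault]
    by_cases hy : d.contains y
    · simp [hy]
    · by_cases hyg : y ∈ g <;> simp [hy, hyg, firstGroup?]

theorem firstGroup_eq (gs : List (List Int)) (y : Int) :
    (firstGroup? gs y).getD [] = firstGroup gs y := by
  induction gs with
  | nil => simp [firstGroup?, firstGroup]
  | cons g gs' ih =>
    by_cases h : y ∈ g <;> simp [firstGroup?, firstGroup, h, ih]

theorem getD_altFirstGroupMap (gs : List (List Int)) (y : Int) :
    (altFirstGroupMap gs).getD y [] = firstGroup gs y := by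
  rw [PySem.Dict.getD_eq_get?_getD, altFirstGroupMap, get?_altFirstGroupMap_gen]
  simp [firstGroup_eq]

theorem scan_eq (y : Int) (s : PySem.Set Int) :
    ∀ gs : List (List Int), pyScanUpdate s gs y = s.update (firstGroup gs y) := by
  intro gs
  induction gs generalizing s with
  | nil => simp [pyScanUpdate, firstGroup, PySem.Set.update]
  | cons g gs' ih =>
    by_cases h : y ∈ g
    · simp [pyScanUpdate, firstGroup, h]
    · simp [pyScanUpdate, firstGroup, h, ih]

theorem guarded_remove (s : PySem.Set Int) (v : Int) :
    (if s.contains v then (match s.remove? v with | some t => t | none => s) else s) = s.discard v := by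
  by_cases h : v ∈ s
  · rw [if_pos (by simpa [PySem.Set.contains_iff] using h), PySem.Set.remove?_of_mem h]
  · rw [if_neg (by simpa [PySem.Set.contains_iff] using h)]
    simp only [PySem.Set.discard]
    rw [List.filter_eq_self.mpr]
    intro a ha
    rcases eq_or_ne a v with rfl | hne
    · exact absurd ha h
    · simp [hne]

theorem adj_eq (y : Int) (r c b : List (List Int)) :
    pyAdjacents y r c b
      = (PySem.Set.ofList ((altFirstGroupMap r).getD y [] ++ (altFirstGroupMap c).getD y []
          ++ (altFirstGroupMap b).getD y [])).discard y := by
  rw [pyAdjacents, scan_eq, scan_eq, scan_eq, guarded_remove,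
    getD_altFirstGroupMap, getD_altFirstGroupMap, getD_altFirstGroupMap]
  conv_rhs => rw [← PySem.Set.update_empty, PySem.Set.update_append, PySem.Set.update_append]

-- ===== VERDICT (by name: the statement is the Claim_ definition above) =====
theorem create_boxes_spec : Claim_equal_create_boxes := by
  intro line r c b m n _
  unfold Spec_create_boxes
  simp only [create_boxes, create_boxes_alt, PySem.Str.len_eq]
  rw [split_eq line.toList]
  set sp := (PySem.List.enumerate line.toList).foldl
      (fun (acc : List Int × PySem.Dict Int String) p =>
        if p.2 = '.' then (acc.1 ++ [p.1], acc.2)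
        else (acc.1, acc.2.insert p.1 (String.ofList [p.2]))) ([], PySem.Dict.empty) with hsp
  have hsub : List.Sublist sp.1 (PySem.List.pyRange 0 (line.toList.length : Int) 1) := by
    have hbody : (fun (acc : List Int × PySem.Dict Int String) p =>
        if p.2 = '.' then (acc.1 ++ [p.1], acc.2)
        else (acc.1, acc.2.insert p.1 (String.ofList [p.2])))
      = (fun (acc : List Int × PySem.Dict Int String) p =>
          ((fun l (p : Int × Char) => if p.2 = '.' then l ++ [p.1] else l) acc.1 p,
           (fun d (p : Int × Char) => if p.2 = '.' then d else d.insert p.1 (String.ofList [p.2])) acc.2 p)) := by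
      funext acc p
      by_cases h : p.2 = '.' <;> simp [h]
    rw [hsp, hbody]
    rw [PySem.List.foldl_prod_mk (fun l (p : Int × Char) => if p.2 = '.' then l ++ [p.1] else l)
      (fun d (p : Int × Char) => if p.2 = '.' then d else d.insert p.1 (String.ofList [p.2]))
      (PySem.List.enumerate line.toList) ([] : List Int) (PySem.Dict.empty : PySem.Dict Int String)]
    have h1 := fold_fst_sublist (PySem.List.enumerate line.toList) []
    have h2 := PySem.List.map_fst_enumerate line.toList 0
    simp only [List.nil_append] at h1
    rw [h2] at h1
    simpa using h1
  have hnodup : (PySem.List.pyRange 0 (line.toList.length : Int) 1).Nodup :=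
    PySem.List.nodup_pyRange_one 0 (line.toList.length : Int)
  have hfilt : (PySem.List.pyRange 0 (line.toList.length : Int) 1).filter
      (fun y => sp.1.contains y) = sp.1 := by
    have hpred : (fun y => sp.1.contains y) = (fun y => decide (y ∈ sp.1)) := by
      funext y
      by_cases h : y ∈ sp.1 <;> simp [h]
    rw [hpred]
    exact filter_mem_of_sublist hsub hnodup
  have hloop : (PySem.List.pyRange 0 (line.toList.length : Int) 1).foldl
      (fun (acc : PySem.Dict Int (PySem.Set Int) × PySem.Dict Int (List String)) y =>
        if sp.1.contains y then
          let lut := acc.1.insert y (pyAdjacents y r c b)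
          (lut, acc.2.insert y (pyDeterminePossibles y sp.2 lut PySem.Dict.empty (m * n)))
        else acc)
      (PySem.Dict.empty, PySem.Dict.empty)
    = sp.1.foldl
      (fun (acc : PySem.Dict Int (PySem.Set Int) × PySem.Dict Int (List String)) y =>
        let neighbors := (PySem.Set.ofList ((altFirstGroupMap r).getD y []
          ++ (altFirstGroupMap c).getD y [] ++ (altFirstGroupMap b).getD y [])).discard y
        let taken := PySem.Set.ofList ((neighbors.filter (fun v => sp.2.contains v)).map
          (fun v => sp.2.getD v ""))
        (acc.1.insert y neighbors, acc.2.insert y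
          ((PySem.Set.ofList (if m * n = 9 then ["1","2","3","4","5","6","7","8","9"]
            else if m * n = 12 then ["1","2","3","4","5","6","7","8","9","A","B","C"]
            else if m * n = 16 then ["1","2","3","4","5","6","7","8","9","A","B","C","D","E","F","G"]
            else [])).diff taken)))
      (PySem.Dict.empty, PySem.Dict.empty) := by
    rw [← List.foldl_filter, hfilt]
    congr 1
    funext acc y
    simp only [pyDeterminePossibles, adj_eq, PySem.Dict.getD_insert, if_pos]
    have e9 : (PySem.Set.ofList ["1","2","3","4","5","6","7","8","9"] : PySem.Set String)
        = ["1","2","3","4","5","6","7","8","9"] := by decide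
    have e12 : (PySem.Set.ofList ["1","2","3","4","5","6","7","8","9","A","B","C"] : PySem.Set String)
        = ["1","2","3","4","5","6","7","8","9","A","B","C"] := by decide
    have e16 : (PySem.Set.ofList ["1","2","3","4","5","6","7","8","9","A","B","C","D","E","F","G"] : PySem.Set String)
        = ["1","2","3","4","5","6","7","8","9","A","B","C","D","E","F","G"] := by decide
    by_cases h9 : m * n = 9
    · simp [h9, PySem.Set.update_empty, e9]
    · by_cases h12 : m * n = 12
      · simp [h12, PySem.Set.update_empty, e12]
      · by_cases h16 : m * n = 16
        · simp [h16, e16]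
        · simp [h9, h12, h16]
  rw [hloop]
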